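-- pv_equiv track=rewrite | github.com/huggingface/diffusers | notebooks/audio_ldm_generator.py | gen_caption
-- ===== SOURCE A (Python) =====
-- def gen_caption(classes):
--     # Generate a caption
--     caption = "generate sound of a"
--
--     for i, c in enumerate(classes):
--         if i == 0:
--             caption += f" {c}"
--         elif i == len(classes) - 1:
--             caption += f", and a {c}."
--         else:
--             caption += f", a {c}"
--     return caption
-- ===== SOURCE B (Python) =====
-- def gen_caption(classes):
--     if not classes:
--         return "generate sound of a"
--     if len(classes) == 1:
--         return f"generate sound of a {classes[0]}"
--     return f"generate sound of a {', a '.join(classes[:-1])}, and a {classes[-1]}."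
-- ===== Notes on version B (the rewrite author's own statement) =====
-- stated objective: idiomatic
-- what changed: Replaces A's enumerate loop with per-iteration i==0 / i==len-1 index branching by a loop-free formulation: three early-return cases (empty, singleton, general), the general case being one f-string built with ', a '.join(classes[:-1]) plus the terminal 'and a' clause.
import Mathlib
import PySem

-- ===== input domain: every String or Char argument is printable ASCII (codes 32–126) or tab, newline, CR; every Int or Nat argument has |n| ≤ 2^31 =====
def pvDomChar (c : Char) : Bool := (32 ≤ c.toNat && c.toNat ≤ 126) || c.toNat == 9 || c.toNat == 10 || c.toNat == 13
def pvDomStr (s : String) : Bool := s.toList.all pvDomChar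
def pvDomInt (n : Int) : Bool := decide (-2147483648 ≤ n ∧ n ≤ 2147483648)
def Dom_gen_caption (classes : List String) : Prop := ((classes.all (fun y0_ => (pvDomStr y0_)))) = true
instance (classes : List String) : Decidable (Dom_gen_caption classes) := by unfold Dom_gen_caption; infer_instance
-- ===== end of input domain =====

-- B replaces A's index-branching enumerate loop by a loop-free join-based formulation; objective: idiomatic.


-- ===== PORT A =====
-- loop body of A (branches in source order), parametrised by len(classes)
def genCapStep (n : Int) (caption : String) (ic : Int × String) : String :=
  if ic.1 == 0 then caption ++ " " ++ ic.2
  else if ic.1 == n - 1 then caption ++ ", and a " ++ ic.2 ++ "."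
  else caption ++ ", a " ++ ic.2

def gen_caption (classes : List String) : String :=
  (PySem.List.enumerate classes).foldl (genCapStep (classes.length : Int)) "generate sound of a"

-- ===== PORT B =====
-- Source B line for line: two early returns, then one f-string whose middle is ', a '.join(classes[:-1])
def gen_caption_alt (classes : List String) : String :=
  if classes = [] then "generate sound of a"
  else if classes.length = 1 then "generate sound of a " ++ classes.headD ""
  else "generate sound of a " ++ PySem.Str.join ", a " classes.dropLast
         ++ ", and a " ++ classes.getLastD "" ++ "."

-- ===== PRECONDITION & SPEC =====
def Spec_gen_caption (classes : List String) (out : String) : Prop := out = gen_caption_alt classes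
instance (classes : List String) (out : String) : Decidable (Spec_gen_caption classes out) := by unfold Spec_gen_caption; infer_instance

-- ===== CLAIM (what is proved, stated in full; the proofs are below) =====
def Claim_equal_gen_caption : Prop := ∀ (classes : List String), Dom_gen_caption classes → Spec_gen_caption classes (gen_caption classes)

-- ===== LEMMAS AND PROOFS =====
lemma join_cons_cons (s a b : String) (l : List String) :
    PySem.Str.join s (a :: b :: l) = a ++ s ++ PySem.Str.join s (b :: l) := by
  simp [PySem.Str.join, PySem.Chars.join_cons_cons, String.append_assoc]

lemma join_singleton (s a : String) : PySem.Str.join s [a] = a := by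
  simp [PySem.Str.join, PySem.Chars.join_singleton]

-- A's ", a " accumulation seeded with p ++ x is p ++ the join over x :: l.
lemma foldl_sep : ∀ (l : List String) (p x : String),
    l.foldl (fun cap c => cap ++ ", a " ++ c) (p ++ x)
      = p ++ PySem.Str.join ", a " (x :: l) := by
  intro l
  induction l with
  | nil => intro p x; simp [join_singleton]
  | cons y t ih =>
    intro p x
    simp only [List.foldl_cons]
    rw [show p ++ x ++ ", a " ++ y = p ++ (x ++ ", a " ++ y) by
      simp [String.append_assoc]]
    rw [ih p (x ++ ", a " ++ y), join_cons_cons]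
    cases t with
    | nil => simp [join_singleton, String.append_assoc]
    | cons z u => simp [join_cons_cons, String.append_assoc]

-- Tail invariant: once past the head (index k ≥ 1), A's loop over the remaining
-- nonempty list equals the ", a "-accumulation over its front plus the terminal clause.
lemma genCap_tail (n : Int) : ∀ (l : List String) (x : String) (k : Int) (acc : String),
    1 ≤ k → k + ((l.length : Int) + 1) = n →
    (PySem.List.enumerate (x :: l) k).foldl (genCapStep n) acc
      = ((x :: l).dropLast.foldl (fun cap c => cap ++ ", a " ++ c) acc)
          ++ ", and a " ++ (l.getLastD x) ++ "." := by
  intro l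
  induction l with
  | nil =>
    intro x k acc hk hn
    simp only [List.length_nil] at hn
    simp only [PySem.List.enumerate_cons, PySem.List.enumerate_nil,
      List.foldl_cons, List.foldl_nil, genCapStep]
    have h0 : ¬ (k == 0) = true := by simp; omega
    have h1 : (k == n - 1) = true := by simp; omega
    simp [h0, h1, List.getLastD]
  | cons y t ih =>
    intro x k acc hk hn
    rw [PySem.List.enumerate_cons]
    simp only [List.foldl_cons]
    have h0 : ¬ (k == 0) = true := by simp; omega
    have h1 : ¬ (k == n - 1) = true := by
      simp only [List.length_cons] at hn
      simp; push_cast at hn ⊢; omega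
    rw [show genCapStep n acc (k, x) = acc ++ ", a " ++ x by simp [genCapStep, h0, h1]]
    rw [ih y (k + 1) (acc ++ ", a " ++ x) (by omega)
        (by simp only [List.length_cons] at hn ⊢; push_cast at hn ⊢; omega)]
    simp only [List.dropLast_cons₂, List.foldl_cons, List.getLastD_cons]

-- ===== VERDICT (by name: the statement is the Claim_ definition above) =====
theorem gen_caption_spec : Claim_equal_gen_caption := by
  intro classes _
  unfold Spec_gen_caption gen_caption gen_caption_alt
  match classes with
  | [] => simp [PySem.List.enumerate_nil]
  | [c] =>
    simp [PySem.List.enumerate_cons, PySem.List.enumerate_nil, genCapStep]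
  | c0 :: x :: l =>
    rw [PySem.List.enumerate_cons]
    simp only [List.foldl_cons]
    rw [show genCapStep ((c0 :: x :: l).length : Int) "generate sound of a" (0, c0)
          = "generate sound of a " ++ c0 by simp [genCapStep]]
    rw [show (0 : Int) + 1 = 1 from by norm_num]
    rw [genCap_tail _ l x 1 _ (by omega)
        (by simp only [List.length_cons]; push_cast; omega)]
    rw [foldl_sep]
    rw [if_neg (by simp : ¬ (c0 :: x :: l) = []),
        if_neg (by simp : ¬ (c0 :: x :: l).length = 1)]
    have hlast : (c0 :: x :: l).getLastD "" = l.getLastD x := by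
      cases l <;> simp [List.getLastD]
    rw [hlast]
    rfl
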